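-- pv_equiv track=rewrite | github.com/Mo-bile/python_Algorithm | 프로그래머스/1/135808. 과일 장수/과일 장수.py | solution
-- ===== SOURCE A (Python) =====
-- def solution(k, m, score):
--     # k == 사과의 최대점수
--     # m == 한개 상자에 사과의 수
--     # score == 사과의 점수들
--
--     score.sort()
--
--     price = 0
--     apple_box = []
--     # while m - 1 < len(score) :
--     while 0 < len(score)  :
--         apple_box.append(score.pop())
--         if len(apple_box) == m:
--             price += min(apple_box) * m
--             apple_box = []
--     return price
-- ===== SOURCE B (Python) =====
-- def solution(k, m, score):
--     score.sort()
--     return sum(score[i] * m for i in range(len(score) - m, -1, -m))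
-- ===== Notes on version B (the rewrite author's own statement) =====
-- stated objective: simpler
-- what changed: A pops elements one by one into an m-element box and scans the box with min(); B, after the same in-place sort, directly sums score[i]*m at the box-minimum indices i = n-m, n-2m, ... via a strided range, never materialising boxes (measured ~1.7x faster).
-- outside the precondition, e.g. on solution(0, 0, [1]): A returns 0, B raises ValueError
import Mathlib
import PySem

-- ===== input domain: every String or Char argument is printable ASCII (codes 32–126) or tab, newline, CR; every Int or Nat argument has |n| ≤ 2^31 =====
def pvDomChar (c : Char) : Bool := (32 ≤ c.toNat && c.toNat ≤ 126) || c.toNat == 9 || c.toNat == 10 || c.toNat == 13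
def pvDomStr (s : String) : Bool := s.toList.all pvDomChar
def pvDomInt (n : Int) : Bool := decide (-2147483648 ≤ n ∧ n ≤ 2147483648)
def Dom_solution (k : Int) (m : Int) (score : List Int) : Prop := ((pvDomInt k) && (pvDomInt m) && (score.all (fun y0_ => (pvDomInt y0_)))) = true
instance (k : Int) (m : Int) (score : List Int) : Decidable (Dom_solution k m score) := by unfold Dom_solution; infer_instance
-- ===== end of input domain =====

-- B replaces A's pop-into-a-box loop with a strided sum over the box-minimum indices of the
-- sorted list (objective: simpler).  Both A and B sort `score` in place; the equivalence
-- proved here is about the return value (the mutation is identical in A and B).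

-- ===== PORT A =====
-- the while loop of A: pops from the end of `score`, fills `box`, adds min(box)*m when full
def solutionLoop (m : Int) (score : List Int) (price : Int) (box : List Int) : Int :=
  if 0 < score.length then
    match hp : PySem.List.pop? score with
    | some (x, rest) =>
      if (((box ++ [x]).length : Int) = m) then
        solutionLoop m rest (price + ((PySem.List.min? (box ++ [x]) (fun y => y)).getD 0) * m) []
      else
        solutionLoop m rest price (box ++ [x])
    | none => price
  else price
termination_by score.length
decreasing_by
  · have h2 : rest.length + 1 = score.length := by
      simpa using PySem.List.length_of_pop?_eq_some score hp
    omega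
  · have h2 : rest.length + 1 = score.length := by
      simpa using PySem.List.length_of_pop?_eq_some score hp
    omega

def solution (k : Int) (m : Int) (score : List Int) : Int :=
  solutionLoop m (PySem.List.sorted score (fun x => x)) 0 []

-- ===== PORT B =====
def solution_alt (k : Int) (m : Int) (score : List Int) : Int :=
  let s := PySem.List.sorted score (fun x => x)
  ((PySem.List.pyRange ((s.length : Int) - m) (-1) (-m)).map
      (fun i => PySem.List.pyGetD s i 0 * m)).sum

-- ===== PRECONDITION & SPEC =====
-- Pre_ excludes only m = 0, where B's range(..., 0) raises ValueError (A returns 0 there).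
def Pre_solution (k : Int) (m : Int) (score : List Int) : Prop := m ≠ 0
instance (k : Int) (m : Int) (score : List Int) : Decidable (Pre_solution k m score) := by unfold Pre_solution; infer_instance
def pvWitness_solution : Int × Int × List Int := (5, 2, [1, 2, 3, 4, 5])

def Spec_solution (k : Int) (m : Int) (score : List Int) (out : Int) : Prop := out = solution_alt k m score
instance (k : Int) (m : Int) (score : List Int) (out : Int) : Decidable (Spec_solution k m score out) := by unfold Spec_solution; infer_instance

-- ===== CLAIM (what is proved, stated in full; the proofs are below) =====
def Claim_equal_solution : Prop := ∀ (k : Int) (m : Int) (score : List Int), Dom_solution k m score → Pre_solution k m score → Spec_solution k m score (solution k m score)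

-- ===== LEMMAS AND PROOFS =====

-- one unfolding of the loop on a nonempty list (pop takes the last element)
lemma loop_snoc (m : Int) (ys : List Int) (x : Int) (p : Int) (box : List Int) :
    solutionLoop m (ys ++ [x]) p box =
      if (((box ++ [x]).length : Int) = m) then
        solutionLoop m ys (p + ((PySem.List.min? (box ++ [x]) (fun y => y)).getD 0) * m) []
      else
        solutionLoop m ys p (box ++ [x]) := by
  rw [solutionLoop, if_pos (by simp : 0 < (ys ++ [x]).length)]
  split
  next x1 rest hp =>
    rw [PySem.List.pop?_last] at hp
    cases hp
    rfl
  next hp =>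
    rw [PySem.List.pop?_last] at hp
    cases hp

lemma loop_nil (m p : Int) (box : List Int) : solutionLoop m [] p box = p := by
  rw [solutionLoop]; simp

-- the accumulated price factors out
lemma loop_add (m : Int) (s : List Int) : ∀ (p : Int) (box : List Int),
    solutionLoop m s p box = p + solutionLoop m s 0 box := by
  induction s using List.reverseRecOn with
  | nil => intro p box; simp [loop_nil]
  | append_singleton ys x ih =>
    intro p box
    rw [loop_snoc, loop_snoc]
    split_ifs
    · rw [ih, ih (0 + _)]; ring
    · rw [ih p, ih 0]

-- with m ≤ 0 the box never reaches length m: price is unchanged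
lemma loop_nonpos (m : Int) (hm : m ≤ 0) (s : List Int) : ∀ (p : Int) (box : List Int),
    solutionLoop m s p box = p := by
  induction s using List.reverseRecOn with
  | nil => intro p box; simp [loop_nil]
  | append_singleton ys x ih =>
    intro p box
    rw [loop_snoc]
    have : ¬ (((box ++ [x]).length : Int) = m) := by simp; omega
    rw [if_neg this, ih]

-- too few elements to complete a box: price is unchanged
lemma loop_drain (m : Int) (s : List Int) : ∀ (p : Int) (box : List Int),
    (box.length : Int) + s.length < m → solutionLoop m s p box = p := by
  induction s using List.reverseRecOn with
  | nil => intro p box _; simp [loop_nil]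
  | append_singleton ys x ih =>
    intro p box h
    rw [loop_snoc]
    simp only [List.length_append, List.length_singleton] at h ⊢
    have : ¬ ((((box.length + 1 : Nat)) : Int) = m) := by push_cast at h ⊢; omega
    rw [if_neg this, ih]
    simp only [List.length_append, List.length_singleton]
    push_cast at h ⊢; omega

-- consuming one full box: the loop removes the top (m - |box|) elements of the sorted list,
-- and the completed box's minimum is the element at index |s| + |box| - m
lemma loop_consume (m : Int) (hm : 0 < m) (s : List Int) : ∀ (p : Int) (box : List Int),
    s.Pairwise (· ≤ ·) →
    (∀ y ∈ box, ∀ z ∈ s, z ≤ y) →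
    (box.length : Int) < m → m ≤ (box.length : Int) + s.length →
    solutionLoop m s p box =
      solutionLoop m (s.take (s.length + box.length - m.toNat))
        (p + (s.getD (s.length + box.length - m.toNat) 0) * m) [] := by
  induction s using List.reverseRecOn with
  | nil =>
    intro p box _ _ h1 h2
    simp only [List.length_nil] at h2; omega
  | append_singleton ys x ih =>
    intro p box hpw hdom h1 h2
    have hpw' : ys.Pairwise (· ≤ ·) ∧ ∀ z ∈ ys, z ≤ x := by
      rw [List.pairwise_append] at hpw
      exact ⟨hpw.1, fun z hz => hpw.2.2 z hz x (List.mem_singleton_self x)⟩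
    rw [loop_snoc]
    by_cases hc : (((box ++ [x]).length : Int) = m)
    · rw [if_pos hc]
      simp only [List.length_append, List.length_singleton] at hc
      have hj : (ys ++ [x]).length + box.length - m.toNat = ys.length := by
        simp only [List.length_append, List.length_singleton]; omega
      rw [hj]
      have htake : (ys ++ [x]).take ys.length = ys := by
        rw [List.take_append_of_le_length (le_refl _), List.take_length]
      have hget : (ys ++ [x]).getD ys.length 0 = x := by
        rw [List.getD_eq_getElem _ _ (by simp)]
        simp
      have hmin : (PySem.List.min? (box ++ [x]) (fun y => y)).getD 0 = x := by
        cases hmn : PySem.List.min? (box ++ [x]) (fun y => y) with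
        | none =>
          rw [PySem.List.min?_eq_none_iff] at hmn
          simp at hmn
        | some v =>
          have hvle : v ≤ x := PySem.List.min?_isMin hmn x (by simp)
          have hvmem := PySem.List.min?_mem hmn
          rcases List.mem_append.mp hvmem with hv | hv
          · have : x ≤ v := hdom v hv x (by simp)
            simp [le_antisymm hvle this]
          · simp at hv; simp [hv]
      rw [htake, hget, hmin]
    · rw [if_neg hc]
      simp only [List.length_append, List.length_singleton] at hc h1 h2 ⊢
      have hlt : ((box.length + 1 : Nat) : Int) < m := by
        push_cast at hc ⊢; omega
      have hdom' : ∀ y ∈ box ++ [x], ∀ z ∈ ys, z ≤ y := by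
        intro y hy z hz
        rcases List.mem_append.mp hy with hy | hy
        · exact hdom y hy z (List.mem_append_left _ hz)
        · simp at hy; subst hy; exact hpw'.2 z hz
      have hle : m ≤ ((box ++ [x]).length : Int) + ys.length := by
        simp only [List.length_append, List.length_singleton]; push_cast at h2 ⊢; omega
      have := ih p (box ++ [x]) hpw'.1 hdom'
        (by simp only [List.length_append, List.length_singleton]; exact_mod_cast hlt) hle
      simp only [List.length_append, List.length_singleton] at this
      rw [this]
      have hjlt : ys.length + (box.length + 1) - m.toNat < ys.length := by
        push_cast at hlt h2; omega
      have hj : ys.length + 1 + box.length - m.toNat = ys.length + (box.length + 1) - m.toNat := by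
        omega
      rw [hj]
      congr 1
      · rw [List.take_append_of_le_length (by omega)]
      · have hgd : (ys ++ [x]).getD (ys.length + (box.length + 1) - m.toNat) 0
            = ys.getD (ys.length + (box.length + 1) - m.toNat) 0 := by
          rw [List.getD_eq_getElem _ _
              (by simp only [List.length_append, List.length_singleton]; omega),
            List.getD_eq_getElem _ _ (by omega)]
          exact List.getElem_append_left hjlt
        rw [hgd]

-- range(a, b, step) with a negative step: nil and cons forms, and membership bounds
lemma pyRange_neg_nil (a b step : Int) (hs : step < 0) (h : a ≤ b) :
    PySem.List.pyRange a b step = [] := by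
  unfold PySem.List.pyRange
  rw [if_neg (by omega : ¬ step = 0)]
  simp only [if_neg (by omega : ¬ (0 : Int) < step), if_neg (by omega : ¬ b < a)]
  simp

lemma pyRange_neg_cons (a b step : Int) (hs : step < 0) (h : b < a) :
    PySem.List.pyRange a b step = a :: PySem.List.pyRange (a + step) b step := by
  unfold PySem.List.pyRange
  rw [if_neg (by omega : ¬ step = 0), if_neg (by omega : ¬ step = 0)]
  simp only [if_neg (by omega : ¬ (0 : Int) < step), if_pos h]
  have key : a - b + -step - 1 = (a - b - 1) + 1 * (-step) := by ring
  have h2 : (a - b + -step - 1) / (-step) = (a - b - 1) / (-step) + 1 := by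
    rw [key, Int.add_mul_ediv_right _ _ (by omega : (-step) ≠ 0)]
  have hx : 0 ≤ (a - b - 1) / (-step) := Int.ediv_nonneg (by omega) (by omega)
  by_cases hcase : b < a + step
  · simp only [if_pos hcase]
    have h3 : a + step - b + -step - 1 = a - b - 1 := by ring
    have hcnt : ((a - b + -step - 1) / (-step)).toNat
        = ((a + step - b + -step - 1) / (-step)).toNat + 1 := by
      rw [h3, h2]; omega
    rw [hcnt, List.range_succ_eq_map, List.map_cons, List.map_map]
    congr 1
    · simp
    · apply List.map_congr_left
      intro k _
      simp only [Function.comp_apply]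
      push_cast [Nat.succ_eq_add_one]; ring
  · simp only [if_neg hcase]
    have hx2 : a - b - 1 < -step := by omega
    have hz : (a - b - 1) / (-step) = 0 := Int.ediv_eq_zero_of_lt (by omega) hx2
    have hcnt : ((a - b + -step - 1) / (-step)).toNat = 1 := by rw [h2, hz]; rfl
    rw [hcnt]
    simp

lemma mem_pyRange_neg (b step : Int) (hs : step < 0) :
    ∀ (a x : Int), x ∈ PySem.List.pyRange a b step → b < x ∧ x ≤ a := by
  suffices H : ∀ (n : Nat) (a x : Int), (a - b).toNat = n →
      x ∈ PySem.List.pyRange a b step → b < x ∧ x ≤ a by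
    intro a x hx; exact H (a - b).toNat a x rfl hx
  intro n
  induction n using Nat.strong_induction_on with
  | _ n ih =>
    intro a x hn hx
    by_cases h : b < a
    · rw [pyRange_neg_cons a b step hs h] at hx
      rcases List.mem_cons.mp hx with rfl | hx'
      · omega
      · have := ih (a + step - b).toNat (by omega) (a + step) x rfl hx'
        omega
    · rw [pyRange_neg_nil a b step hs (by omega)] at hx
      cases hx

-- the loop on a sorted list equals B's strided sum
lemma loop_eq_sum (m : Int) (hm : 0 < m) :
    ∀ (s : List Int), s.Pairwise (· ≤ ·) →
      solutionLoop m s 0 [] =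
        ((PySem.List.pyRange ((s.length : Int) - m) (-1) (-m)).map
            (fun i => PySem.List.pyGetD s i 0 * m)).sum := by
  suffices H : ∀ (n : Nat) (s : List Int), s.length = n → s.Pairwise (· ≤ ·) →
      solutionLoop m s 0 [] =
        ((PySem.List.pyRange ((s.length : Int) - m) (-1) (-m)).map
            (fun i => PySem.List.pyGetD s i 0 * m)).sum by
    intro s hpw; exact H s.length s rfl hpw
  intro n
  induction n using Nat.strong_induction_on with
  | _ n ih =>
    intro s hn hpw
    by_cases hlen : (s.length : Int) < m
    · rw [loop_drain m s 0 [] (by simpa using hlen)]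
      rw [pyRange_neg_nil _ _ _ (by omega) (by omega)]
      simp
    · rw [not_lt] at hlen
      set j : Nat := s.length - m.toNat with hj
      have hjcast : (j : Int) = (s.length : Int) - m := by
        simp only [hj]; omega
      have hjlt : j < s.length := by omega
      have step1 := loop_consume m hm s 0 [] hpw (by simp) (by simpa using hm) (by simpa using hlen)
      simp only [List.length_nil, Nat.add_zero] at step1
      rw [step1, loop_add]
      have htl : (s.take j).length = j := by
        rw [List.length_take]; omega
      have hIH := ih j (by omega) (s.take j) htl (hpw.sublist (List.take_sublist _ _))
      rw [hIH, htl, hjcast]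
      rw [pyRange_neg_cons ((s.length : Int) - m) (-1) (-m) (by omega) (by omega)]
      rw [List.map_cons, List.sum_cons]
      have hhead : PySem.List.pyGetD s ((s.length : Int) - m) 0 = s.getD j 0 := by
        rw [← hjcast, PySem.List.pyGetD_natCast]
      rw [hhead]
      have htail :
          ((PySem.List.pyRange ((s.length : Int) - m - m) (-1) (-m)).map
              (fun i => PySem.List.pyGetD (s.take j) i 0 * m)).sum =
          ((PySem.List.pyRange ((s.length : Int) - m + -m) (-1) (-m)).map
              (fun i => PySem.List.pyGetD s i 0 * m)).sum := by
        have harg : (s.length : Int) - m - m = (s.length : Int) - m + -m := by ring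
        rw [harg]
        congr 1
        apply List.map_congr_left
        intro i hi
        have hb := mem_pyRange_neg (-1) (-m) (by omega) _ i hi
        have h0 : 0 ≤ i := by omega
        have h1 : i < ((s.take j).length : Int) := by rw [htl]; omega
        have h1' : i < (s.length : Int) := by omega
        rw [PySem.List.pyGetD_eq_getElem _ _ h0 h1, PySem.List.pyGetD_eq_getElem _ _ h0 h1']
        congr 1
        exact List.getElem_take
      rw [← htail]
      ring

-- ===== VERDICT (by name: the statement is the Claim_ definition above) =====
theorem solution_spec : Claim_equal_solution := by
  intro k m score _ hpre
  have hgoal : ∀ (s : List Int), s.Pairwise (· ≤ ·) →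
      solutionLoop m s 0 [] =
        ((PySem.List.pyRange ((s.length : Int) - m) (-1) (-m)).map
            (fun i => PySem.List.pyGetD s i 0 * m)).sum := by
    intro s hpw
    rcases lt_trichotomy m 0 with hm | hm | hm
    · rw [loop_nonpos m (by omega) s 0 [],
        PySem.List.pyRange_of_pos _ _ (by omega : (0:Int) < -m),
        if_neg (by omega : ¬ ((s.length : Int) - m < -1))]
      simp
    · exact absurd hm hpre
    · exact loop_eq_sum m hm s hpw
  show solutionLoop m (PySem.List.sorted score (fun x => x)) 0 [] =
      ((PySem.List.pyRange (((PySem.List.sorted score (fun x => x)).length : Int) - m) (-1) (-m)).map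
          (fun i => PySem.List.pyGetD (PySem.List.sorted score (fun x => x)) i 0 * m)).sum
  exact hgoal _ (PySem.List.sorted_pairwise score (fun x => x))
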